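-- pv_equiv track=rewrite | github.com/elohhim/aoc | python/aoc/2015/13.py | happiness
-- ===== SOURCE A (Python) =====
-- from collections import defaultdict, deque
-- from typing import Callable, Dict, Iterable, Tuple
--
-- HappinessMap = Dict[str, Dict[str, int]]
--
-- def happiness(hapiness_map: HappinessMap,
--               permutation: Iterable[str]) -> int:
--     l_neighbours = deque(permutation)
--     l_neighbours.rotate(1)
--     r_neighbours = deque(permutation)
--     r_neighbours.rotate(-1)
--     triples = zip(l_neighbours, permutation, r_neighbours)
--
--     def person_happiness(t: Tuple[str, str, str]) -> int:
--         l, p, r = t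
--         return hapiness_map[p][l] + hapiness_map[p][r]
--
--     return sum(person_happiness(t) for t in triples)
-- ===== SOURCE B (Python) =====
-- from collections import Counter
--
-- def happiness(hapiness_map, permutation):
--     perm = list(permutation)
--     n = len(perm)
--     edges = [(perm[i], perm[(i + 1) % n]) for i in range(n)]
--     directed = Counter(edges + [(v, u) for (u, v) in edges])
--     return sum(c * hapiness_map[u][v] for (u, v), c in directed.items())
-- ===== Notes on version B (the rewrite author's own statement) =====
-- stated objective: alternative
-- what changed: B first aggregates all directed cycle adjacencies into a Counter (multiset of (person, neighbour) pairs) and then sums multiplicity * happiness over the distinct pairs, instead of A's single pass of per-person left+right lookups over triples built from two rotated deques.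
import Mathlib
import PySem

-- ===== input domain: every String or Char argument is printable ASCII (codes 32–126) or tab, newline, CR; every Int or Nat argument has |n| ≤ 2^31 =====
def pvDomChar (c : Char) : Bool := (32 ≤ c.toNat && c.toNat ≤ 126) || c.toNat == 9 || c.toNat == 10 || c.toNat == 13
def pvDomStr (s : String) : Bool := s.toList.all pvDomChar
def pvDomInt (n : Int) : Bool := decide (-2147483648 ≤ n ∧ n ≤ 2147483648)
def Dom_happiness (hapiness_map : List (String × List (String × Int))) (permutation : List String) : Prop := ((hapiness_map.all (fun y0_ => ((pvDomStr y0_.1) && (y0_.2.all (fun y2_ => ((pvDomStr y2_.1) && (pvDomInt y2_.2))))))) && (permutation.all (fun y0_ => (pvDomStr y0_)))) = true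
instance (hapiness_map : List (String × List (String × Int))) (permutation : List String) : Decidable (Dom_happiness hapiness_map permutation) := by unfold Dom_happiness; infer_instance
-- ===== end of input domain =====

-- B aggregates the cycle's directed adjacencies into a Counter and sums count*value over its
-- distinct directed pairs, instead of A's per-person left+right lookups over triples from two rotated deques.


-- dict lookups (Python `d[k]`); the `.getD` defaults are never reached under Pre_happiness,
-- which excludes exactly the KeyError inputs
def pvDGet (m : List (String × List (String × Int))) (k : String) : List (String × Int) :=
  ((PySem.Dict.mk m).get? k).getD []
def pvIGet (d : List (String × Int)) (k : String) : Int :=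
  ((PySem.Dict.mk d).get? k).getD 0

-- ===== PORT A =====
-- deque.rotate(1): last element to the front
def pvRotR (xs : List String) : List String := xs.drop (xs.length - 1) ++ xs.take (xs.length - 1)
-- deque.rotate(-1): first element to the back
def pvRotL (xs : List String) : List String := xs.drop 1 ++ xs.take 1

def pvPersonHappiness (hapiness_map : List (String × List (String × Int)))
    (t : String × String × String) : Int :=
  pvIGet (pvDGet hapiness_map t.2.1) t.1 + pvIGet (pvDGet hapiness_map t.2.1) t.2.2

def happiness (hapiness_map : List (String × List (String × Int))) (permutation : List String) : Int :=
  let l_neighbours := pvRotR permutation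
  let r_neighbours := pvRotL permutation
  let triples := l_neighbours.zip (permutation.zip r_neighbours)
  triples.foldl (fun acc t => acc + pvPersonHappiness hapiness_map t) 0

-- ===== PORT B =====
def happiness_alt (hapiness_map : List (String × List (String × Int))) (permutation : List String) : Int :=
  let n : Int := permutation.length
  let edges := (PySem.List.pyRange 0 n 1).map
    (fun i => (PySem.List.pyGetD permutation i "",
               PySem.List.pyGetD permutation (PySem.Int.mod (i + 1) n) ""))
  let directed := edges ++ edges.map (fun uv => (uv.2, uv.1))
  (PySem.Dict.counter directed).items.foldl
    (fun acc kv => acc + kv.2 * pvIGet (pvDGet hapiness_map kv.1.1) kv.1.2) 0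

-- ===== PRECONDITION & SPEC =====
def pvLookOk (m : List (String × List (String × Int))) (u v : String) : Bool :=
  (((PySem.Dict.mk m).get? u).bind (fun d => (PySem.Dict.mk d).get? v)).isSome

-- Pre_ excludes exactly the inputs where Python A raises KeyError: some person of the cycle
-- has a cycle-neighbour (either direction) with no happiness entry.
def Pre_happiness (hapiness_map : List (String × List (String × Int))) (permutation : List String) : Prop :=
  ∀ uv ∈ permutation.zip (permutation.drop 1 ++ permutation.take 1),
    (pvLookOk hapiness_map uv.1 uv.2 && pvLookOk hapiness_map uv.2 uv.1) = true
instance (hapiness_map : List (String × List (String × Int))) (permutation : List String) : Decidable (Pre_happiness hapiness_map permutation) := by unfold Pre_happiness; infer_instance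

def pvWitness_happiness : (List (String × List (String × Int))) × List String :=
  ([("A", [("B", 2)]), ("B", [("A", -3)])], ["A", "B"])

def Spec_happiness (hapiness_map : List (String × List (String × Int))) (permutation : List String) (out : Int) : Prop := out = happiness_alt hapiness_map permutation
instance (hapiness_map : List (String × List (String × Int))) (permutation : List String) (out : Int) : Decidable (Spec_happiness hapiness_map permutation out) := by unfold Spec_happiness; infer_instance

-- ===== CLAIM (what is proved, stated in full; the proofs are below) =====
def Claim_equal_happiness : Prop := ∀ (hapiness_map : List (String × List (String × Int))) (permutation : List String), Dom_happiness hapiness_map permutation → Pre_happiness hapiness_map permutation → Spec_happiness hapiness_map permutation (happiness hapiness_map permutation)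

-- ===== LEMMAS AND PROOFS =====

-- A's per-triple sum splits into a left-neighbour sum and a right-neighbour sum.
lemma sum_triples_split (m : List (String × List (String × Int))) :
    ∀ (xs ys zs : List String), xs.length = ys.length → ys.length = zs.length →
    ((xs.zip (ys.zip zs)).map (pvPersonHappiness m)).sum =
      ((xs.zip ys).map (fun uv => pvIGet (pvDGet m uv.2) uv.1)).sum +
      ((ys.zip zs).map (fun uv => pvIGet (pvDGet m uv.1) uv.2)).sum := by
  intro xs
  induction xs with
  | nil =>
    intro ys zs h1 h2
    cases ys with
    | nil => simp
    | cons _ _ => simp at h1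
  | cons x xs ih =>
    intro ys zs h1 h2
    cases ys with
    | nil => simp at h1
    | cons y ys =>
      cases zs with
      | nil => simp at h2
      | cons z zs =>
        simp only [List.zip_cons_cons, List.map_cons, List.sum_cons,
          ih ys zs (by simpa using h1) (by simpa using h2), pvPersonHappiness]
        ring

lemma rotR_of_ne_nil (xs : List String) (h : xs ≠ []) :
    pvRotR xs = xs.getLast h :: xs.dropLast := by
  unfold pvRotR
  rw [List.drop_length_sub_one h, ← List.dropLast_eq_take]
  rfl

-- B's index loop builds exactly the cycle's edge list: perm zipped with its left rotation.
lemma edges_eq (perm : List String) :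
    (PySem.List.pyRange 0 (perm.length : Int) 1).map
      (fun i => (PySem.List.pyGetD perm i "",
                 PySem.List.pyGetD perm (PySem.Int.mod (i + 1) (perm.length : Int)) "")) =
    perm.zip (perm.drop 1 ++ perm.take 1) := by
  rcases Nat.eq_zero_or_pos perm.length with h0 | hpos
  · simp [List.eq_nil_of_length_eq_zero h0, PySem.List.pyRange]
  apply List.ext_getElem
  · simp [PySem.List.length_pyRange_one]
    omega
  intro k hk1 hk2
  have hk : k < perm.length := by
    simpa [PySem.List.length_pyRange_one] using hk1
  have hidx : (PySem.List.pyRange 0 (perm.length : Int) 1)[k]'(by simpa [PySem.List.length_pyRange_one] using hk1) = (k : Int) := by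
    rw [PySem.List.getElem_pyRange_one]
    simp
  rw [List.getElem_map, hidx]
  have hmod : PySem.Int.mod ((k : Int) + 1) (perm.length : Int) = (((k + 1) % perm.length : Nat) : Int) := by
    have := PySem.Int.mod_natCast (k + 1) perm.length
    simpa using this
  rw [hmod]
  have hm : (k + 1) % perm.length < perm.length := Nat.mod_lt _ hpos
  rw [PySem.List.pyGetD_natCast perm k "" , PySem.List.pyGetD_natCast perm _ ""]
  · simp only [List.getElem_zip]
    refine Prod.ext ?_ ?_
    · simp [List.getElem?_eq_getElem hk]
    · simp only []
      by_cases hlast : k + 1 < perm.length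
      · have : (k + 1) % perm.length = k + 1 := Nat.mod_eq_of_lt hlast
        rw [List.getElem_append_left (by simp; omega)]
        simp [this, List.getElem?_eq_getElem hlast]
      · have hke : k = perm.length - 1 := by omega
        have : (k + 1) % perm.length = 0 := by
          have : k + 1 = perm.length := by omega
          simp [this]
        rw [List.getElem_append_right (by simp; omega)]
        simp only [this]
        have hkk : k - (List.drop 1 perm).length = 0 := by simp; omega
        simp [List.getD_eq_getElem?_getD, List.getElem?_eq_getElem hpos,
          show k - (perm.length - 1) = 0 from by omega]


-- Summing c * g(k) over Counter(xs).items is summing g over xs.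
lemma counter_items_sum (xs : List (String × String)) (g : String × String → Int) :
    ((PySem.Dict.counter xs).items.map (fun kv => kv.2 * g kv.1)).sum = (xs.map g).sum := by
  rw [PySem.Dict.items_counter, List.map_map]
  have h1 : ((PySem.Set.ofList xs).map ((fun kv : (String × String) × Int => kv.2 * g kv.1) ∘ fun k => (k, (xs.count k : Int)))).sum
      = ∑ k ∈ xs.toFinset, (xs.count k : Int) * g k := by
    rw [← List.sum_toFinset]
    · apply Finset.sum_congr
      · ext a; simp [PySem.Set.mem_ofList]
      · intros; rfl
    · exact PySem.Set.nodup_ofList xs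
  rw [h1, Finset.sum_list_map_count]
  simp
  refine Finset.sum_congr rfl fun x _ => ?_
  have : @List.count _ instBEqProd x xs = @List.count _ instBEqOfDecidableEq x xs := by
    simp only [List.count_eq_countP]
    refine List.countP_congr fun a _ => ?_
    simp only [beq_iff_eq]
  rw [this]

lemma happiness_eq_alt (m : List (String × List (String × Int))) (p : List String) :
    happiness m p = happiness_alt m p := by
  unfold happiness happiness_alt
  rw [PySem.List.foldl_add, PySem.List.foldl_add]
  simp only [zero_add, edges_eq p]
  rw [counter_items_sum _ (fun uv => pvIGet (pvDGet m uv.1) uv.2),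
    List.map_append, List.sum_append, List.map_map]
  cases p with
  | nil => simp [pvRotR, pvRotL]
  | cons a t =>
    have hrl : pvRotL (a :: t) = t ++ [a] := by simp [pvRotL]
    have hne : (a :: t) ≠ [] := by simp
    rw [hrl,
      sum_triples_split m _ _ _ (by simp [pvRotR]; omega) (by simp),
      rotR_of_ne_nil _ hne]
    have hzipL : ((a :: t).getLast hne :: (a :: t).dropLast).zip (a :: t) =
        ((a :: t).getLast hne, a) :: ((a :: t).dropLast).zip t := rfl
    have hzipR : (a :: t).zip (t ++ [a]) =
        ((a :: t).dropLast).zip t ++ [((a :: t).getLast hne, a)] := by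
      conv_lhs => rw [← List.dropLast_concat_getLast hne]
      rw [List.zip_append (by simp)]
      simp
    rw [show List.drop 1 (a :: t) ++ List.take 1 (a :: t) = t ++ [a] from by simp,
      hzipL, hzipR]
    simp only [List.map_cons, List.map_append, List.sum_cons, List.sum_append, List.map_cons,
      List.map_nil, List.sum_cons, List.sum_nil, Function.comp_def]
    ring

-- ===== VERDICT (by name: the statement is the Claim_ definition above) =====
theorem happiness_spec : Claim_equal_happiness := by
  intro m p _ _
  unfold Spec_happiness
  exact happiness_eq_alt m p
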